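-- pv_equiv track=rewrite | github.com/AndriyTkach/Python | Project/Tasks.py | BinMultiply
-- ===== SOURCE A (Python) =====
-- def BinMultiply(s):
--     l = len(s)
--     t = []
--     b_s = []
--     i=0
--     while i<l:
--         s_int=''
--         a = s[i]
--         while '0' <= a <= '9':
--             s_int += a
--             i += 1
--             if i < l:
--                 a = s[i]
--             else:
--                 break
--         i += 1
--         if s_int != '':
--            t.append(int(s_int))
--     for i in t:
--         if i % 5 == 0:
--             b_s.append(i)
--     return b_s
-- ===== SOURCE B (Python) =====
-- def BinMultiply(s):
--     # single fused pass: build each number's value incrementally (Horner),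
--     # filter multiples of 5 on the fly; no substrings, no int(), no second pass
--     res = []
--     cur = 0
--     have = False
--     for c in s:
--         if '0' <= c <= '9':
--             cur = cur * 10 + (ord(c) - 48)
--             have = True
--         else:
--             if have and cur % 5 == 0:
--                 res.append(cur)
--             cur = 0
--             have = False
--     if have and cur % 5 == 0:
--         res.append(cur)
--     return res
-- ===== Notes on version B (the rewrite author's own statement) =====
-- stated objective: faster
-- what changed: Replaces A's two-level index-based scanning loop that builds digit substrings, converts them with int() into a token list and then filters in a second pass, by one fused left-to-right pass that accumulates each number's value incrementally (Horner) and appends multiples of 5 on the fly.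
import Mathlib
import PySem

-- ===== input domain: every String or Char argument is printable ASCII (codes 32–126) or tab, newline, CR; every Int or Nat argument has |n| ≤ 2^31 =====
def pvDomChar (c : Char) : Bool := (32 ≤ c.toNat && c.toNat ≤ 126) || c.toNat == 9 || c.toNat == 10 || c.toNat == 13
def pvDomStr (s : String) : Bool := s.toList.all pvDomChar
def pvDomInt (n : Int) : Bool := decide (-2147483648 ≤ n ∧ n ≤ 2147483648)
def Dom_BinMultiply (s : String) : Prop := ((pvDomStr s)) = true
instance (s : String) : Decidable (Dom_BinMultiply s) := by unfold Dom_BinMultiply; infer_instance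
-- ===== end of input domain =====

-- B replaces A's two-pass substring/int() tokenizer by one fused Horner-accumulating pass that filters on the fly (objective: faster, constant factor — no substrings/int(), one pass; measured).

-- ===== PORT A =====
-- '0' <= a <= '9' (both Pythons use the same comparison)
def pvIsDig (c : Char) : Bool := decide ('0' ≤ c) && decide (c ≤ '9')

-- hand port of int(s_int): s_int here is always a nonempty run of ASCII digits,
-- on which Python's int() is exactly this left fold (exact on that domain)
def pvIntOfDigits (ds : List Char) : Int :=
  ds.foldl (fun acc c => acc * 10 + ((c.toNat : Int) - 48)) 0

-- A's outer while over index i, written as recursion on the remaining characters;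
-- the inner digit-collecting while is the takeWhile/dropWhile pair, the
-- unconditional `i += 1` after it is the `.tail`.
def pvOuterA : List Char → List Int
  | [] => []
  | c :: rest =>
    if pvIsDig c then
      pvIntOfDigits (c :: rest.takeWhile pvIsDig) :: pvOuterA (rest.dropWhile pvIsDig).tail
    else
      pvOuterA rest
termination_by cs => cs.length
decreasing_by
  · have h1 : (rest.dropWhile pvIsDig).length ≤ rest.length := rest.length_dropWhile_le pvIsDig
    have h2 : (rest.dropWhile pvIsDig).tail.length = (rest.dropWhile pvIsDig).length - 1 :=
      (rest.dropWhile pvIsDig).length_tail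
    simp; omega
  · simp

def BinMultiply (s : String) : List Int :=
  let t := pvOuterA s.toList
  t.foldl (fun b_s i => if PySem.Int.mod i 5 == 0 then b_s ++ [i] else b_s) []

-- ===== PORT B =====
-- Source B's loop body: state (res, cur, have)
def pvStepB (st : List Int × Int × Bool) (c : Char) : List Int × Int × Bool :=
  if pvIsDig c then (st.1, st.2.1 * 10 + ((c.toNat : Int) - 48), true)
  else (if st.2.2 && (PySem.Int.mod st.2.1 5 == 0) then st.1 ++ [st.2.1] else st.1, 0, false)

-- Source B's final flush after the loop
def pvFlushB (st : List Int × Int × Bool) : List Int :=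
  if st.2.2 && (PySem.Int.mod st.2.1 5 == 0) then st.1 ++ [st.2.1] else st.1

def BinMultiply_alt (s : String) : List Int :=
  pvFlushB (s.toList.foldl pvStepB ([], 0, false))

-- ===== PRECONDITION & SPEC =====
def Spec_BinMultiply (s : String) (out : List Int) : Prop := out = BinMultiply_alt s
instance (s : String) (out : List Int) : Decidable (Spec_BinMultiply s out) := by unfold Spec_BinMultiply; infer_instance

-- ===== CLAIM (what is proved, stated in full; the proofs are below) =====
def Claim_equal_BinMultiply : Prop := ∀ (s : String), Dom_BinMultiply s → Spec_BinMultiply s (BinMultiply s)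

-- ===== LEMMAS AND PROOFS =====

-- proof-only: the token list B's fold still has to emit from state (cur, hv)
def pvTok : List Char → Int → Bool → List Int
  | [], cur, hv => if hv then [cur] else []
  | c :: rest, cur, hv =>
    if pvIsDig c then pvTok rest (cur * 10 + ((c.toNat : Int) - 48)) true
    else (if hv then [cur] else []) ++ pvTok rest 0 false

theorem pvTok_true (rest : List Char) (cur : Int) :
    pvTok rest cur true =
      (rest.takeWhile pvIsDig).foldl (fun acc c => acc * 10 + ((c.toNat : Int) - 48)) cur ::
        pvTok (rest.dropWhile pvIsDig).tail 0 false := by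
  induction rest generalizing cur with
  | nil => simp [pvTok]
  | cons c rest ih =>
    by_cases h : pvIsDig c = true
    · simp [pvTok, h, List.takeWhile_cons, List.dropWhile_cons, ih]
    · simp [pvTok, h, List.takeWhile_cons, List.dropWhile_cons]

theorem pvTok_eq_outerA (cs : List Char) : pvTok cs 0 false = pvOuterA cs := by
  induction cs using pvOuterA.induct with
  | case1 => simp [pvTok, pvOuterA]
  | case2 c rest h ih =>
    rw [pvOuterA]
    simp only [pvTok, h, if_pos, pvTok_true, ih, pvIntOfDigits, List.foldl_cons]
  | case3 c rest h ih =>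
    rw [pvOuterA]
    simp [pvTok, h, ih]

theorem pvFold_eq (cs : List Char) (res : List Int) (cur : Int) (hv : Bool) :
    pvFlushB (cs.foldl pvStepB (res, cur, hv)) =
      res ++ (pvTok cs cur hv).filter (fun i => PySem.Int.mod i 5 == 0) := by
  induction cs generalizing res cur hv with
  | nil =>
    cases hv
    · simp [pvFlushB, pvTok]
    · have h5 := PySem.Int.mod_eq_zero_iff_dvd cur 5
      cases h : (PySem.Int.mod cur 5 == 0) <;>
        simp only [pvFlushB, pvTok, if_true, List.filter_cons, List.filter_nil,
          h, if_false, Bool.false_eq_true] <;> simp_all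
  | cons c rest ih =>
    cases h : pvIsDig c
    · cases hv
      · simp only [List.foldl_cons, pvStepB, h, Bool.false_eq_true, if_false,
          Bool.false_and, ih, pvTok]
        simp
      · have hd := PySem.Int.mod_eq_zero_iff_dvd cur 5
        cases h5 : (PySem.Int.mod cur 5 == 0) <;>
          simp only [List.foldl_cons, pvStepB, h, Bool.false_eq_true, if_false,
            Bool.true_and, h5, if_true, ih, pvTok, List.filter_append, List.filter_cons,
            List.filter_nil] <;> simp_all
    · simp [List.foldl_cons, pvStepB, h, ih, pvTok]

-- ===== VERDICT (by name: the statement is the Claim_ definition above) =====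
theorem BinMultiply_spec : Claim_equal_BinMultiply := by
  intro s _
  unfold Spec_BinMultiply BinMultiply BinMultiply_alt
  rw [pvFold_eq, pvTok_eq_outerA,
    PySem.List.foldl_append_if_eq_filter (p := fun i => PySem.Int.mod i 5 == 0)]
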